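-- pv_equiv track=rewrite | github.com/ttubb/dexmex | dexmex/convert_featureCounts.py | merge_feature_counts
-- ===== SOURCE A (Python) =====
-- def merge_feature_counts(feature_counts_list: list) -> dict:
--     """
--     Validates and merges multiple feature counts dictionaries by ensuring:
--     - No duplicate samples across files.
--     - The set of feature names is identical across all samples and all files.
--
--     Args:
--     feature_counts_list: List of feature counts dictionaries.
--
--     Returns:
--     A single merged dictionary with samples as keys, containing feature names
--     and their respective counts, if the above conditions are met.
--
--     Raises:
--     ValueError: If the conditions are not met.
--     """
--     all_features_set = set()    # stores all unique feature names
--     merged_counts = {}          # stores all feature counts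
--
--     # First pass to collect all unique feature names and check for duplicate samples
--     for feature_counts in feature_counts_list:
--         for sample, features in feature_counts.items():
--             if sample in merged_counts:
--                 raise ValueError(f"Duplicate condition found: {sample}. Each condition must be unique across files.")
--             merged_counts[sample] = features
--             all_features_set.update(features.keys())
--
--     # Second pass to ensure each condition has the identical set of feature names
--     for sample, features in merged_counts.items():
--         if set(features.keys()) != all_features_set:
--             raise ValueError("Feature set mismatch. All conditions must have the same set of features.")
--
--     return merged_counts
-- ===== SOURCE B (Python) =====
-- def merge_feature_counts(feature_counts_list: list) -> dict:
--     """Merge feature-count dicts; validate unique samples and identical feature sets.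
--
--     Staged decomposition: flatten all (sample, features) items first, scan the
--     flat list once for a duplicate sample, then compare every sample's feature
--     key set against the first sample's (all-equal iff all equal the union),
--     and finally build the merged dict from the flat item list in one shot.
--     """
--     items = [(sample, features)
--              for feature_counts in feature_counts_list
--              for sample, features in feature_counts.items()]
--     seen = set()
--     for sample, _ in items:
--         if sample in seen:
--             raise ValueError(f"Duplicate condition found: {sample}. Each condition must be unique across files.")
--         seen.add(sample)
--     if items:
--         reference = set(items[0][1].keys())
--         for _, features in items:
--             if set(features.keys()) != reference:
--                 raise ValueError("Feature set mismatch. All conditions must have the same set of features.")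
--     return dict(items)
-- ===== Notes on version B (the rewrite author's own statement) =====
-- stated objective: alternative
-- what changed: B flattens all (sample, features) items into one list, scans that flat list once for a duplicate sample with a seen-set, validates by comparing each sample's feature key set to the FIRST sample's set (equivalent to A's comparison against the union when no error is raised), and builds the merged dict from the flat list in one dict() call instead of A's incremental merge with a running union set.
import Mathlib
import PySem

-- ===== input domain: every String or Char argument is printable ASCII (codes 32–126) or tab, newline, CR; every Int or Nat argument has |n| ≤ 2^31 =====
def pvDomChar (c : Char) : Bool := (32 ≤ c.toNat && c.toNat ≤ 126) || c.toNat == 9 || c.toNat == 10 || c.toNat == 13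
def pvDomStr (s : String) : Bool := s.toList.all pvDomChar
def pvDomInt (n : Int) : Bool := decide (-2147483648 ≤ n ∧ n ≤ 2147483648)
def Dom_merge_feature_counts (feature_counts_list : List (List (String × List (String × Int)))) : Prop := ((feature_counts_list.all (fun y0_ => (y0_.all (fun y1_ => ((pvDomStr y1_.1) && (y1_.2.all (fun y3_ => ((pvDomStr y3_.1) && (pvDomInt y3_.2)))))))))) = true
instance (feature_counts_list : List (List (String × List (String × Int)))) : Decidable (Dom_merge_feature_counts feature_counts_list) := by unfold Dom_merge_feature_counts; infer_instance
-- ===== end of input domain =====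

-- B flattens the items first, scans once for a duplicate sample, compares every
-- feature key set to the FIRST sample's, and builds the dict in one shot
-- (alternative decomposition, same cost); equivalence is about the return value.

-- ===== PORT A =====
-- one iteration of A's first pass (state none = ValueError already raised)
def pvA_step (st : Option (PySem.Set String × PySem.Dict String (List (String × Int))))
    (p : String × List (String × Int)) :
    Option (PySem.Set String × PySem.Dict String (List (String × Int))) :=
  match st with
  | none => none
  | some (afs, merged) =>
    if merged.contains p.1 then none  -- raise ValueError (duplicate sample)
    else some (PySem.Set.update afs (p.2.map Prod.fst), merged.insert p.1 p.2)

def merge_feature_counts (feature_counts_list : List (List (String × List (String × Int)))) : List (String × List (String × Int)) :=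
  match feature_counts_list.foldl (fun st fc => fc.foldl pvA_step st)
      (some (PySem.Set.empty, PySem.Dict.empty)) with
  | none => []  -- ValueError; outside Pre_
  | some (afs, merged) =>
    -- second pass: raise unless set(features.keys()) == all_features_set for every sample
    if merged.items.all (fun p => PySem.Set.equal (PySem.Set.ofList (p.2.map Prod.fst)) afs)
    then merged.items else []  -- else: ValueError; outside Pre_

-- ===== PORT B =====
-- B's seen-set scan: is some sample name repeated in the flat item list?
def pvB_hasDup (items : List (String × List (String × Int))) (seen : PySem.Set String) : Bool :=
  match items with
  | [] => false
  | p :: rest =>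
    if PySem.Set.contains seen p.1 then true
    else pvB_hasDup rest (PySem.Set.add seen p.1)

def merge_feature_counts_alt (feature_counts_list : List (List (String × List (String × Int)))) : List (String × List (String × Int)) :=
  let items := feature_counts_list.flatMap (fun feature_counts => feature_counts)
  if pvB_hasDup items PySem.Set.empty then []  -- duplicate-sample ValueError; outside Pre_
  else
    match items with
    | [] => []  -- dict([]) = {}
    | first :: _ =>
      let reference := PySem.Set.ofList (first.2.map Prod.fst)
      if items.all (fun q => PySem.Set.equal (PySem.Set.ofList (q.2.map Prod.fst)) reference)
      then (items.foldl (fun d p => d.insert p.1 p.2) PySem.Dict.empty).items  -- dict(items)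
      else []  -- mismatch ValueError; outside Pre_

-- ===== PRECONDITION & SPEC =====
-- Pre_ excludes exactly the inputs where A raises ValueError (a duplicate sample
-- across the dicts, or a sample whose feature-key set is not the union of all
-- feature keys), plus duplicate keys inside one dict / one features list, which a
-- Python dict argument cannot carry.
def Pre_merge_feature_counts (feature_counts_list : List (List (String × List (String × Int)))) : Prop :=
  (feature_counts_list.flatten.map Prod.fst).Nodup ∧
  (∀ p ∈ feature_counts_list.flatten, (p.2.map Prod.fst).Nodup) ∧
  (∀ p ∈ feature_counts_list.flatten,
    ∀ f ∈ feature_counts_list.flatten.flatMap (fun q => q.2.map Prod.fst), f ∈ p.2.map Prod.fst)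
instance (feature_counts_list : List (List (String × List (String × Int)))) : Decidable (Pre_merge_feature_counts feature_counts_list) := by unfold Pre_merge_feature_counts; infer_instance

def pvWitness_merge_feature_counts : (List (List (String × List (String × Int)))) :=
  [[("s1", [("f", 1)])], [("s2", [("f", 2)])]]

def Spec_merge_feature_counts (feature_counts_list : List (List (String × List (String × Int)))) (out : List (String × List (String × Int))) : Prop := out = merge_feature_counts_alt feature_counts_list
instance (feature_counts_list : List (List (String × List (String × Int)))) (out : List (String × List (String × Int))) : Decidable (Spec_merge_feature_counts feature_counts_list out) := by unfold Spec_merge_feature_counts; infer_instance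

-- ===== CLAIM (what is proved, stated in full; the proofs are below) =====
def Claim_equal_merge_feature_counts : Prop := ∀ (feature_counts_list : List (List (String × List (String × Int)))), Dom_merge_feature_counts feature_counts_list → Pre_merge_feature_counts feature_counts_list → Spec_merge_feature_counts feature_counts_list (merge_feature_counts feature_counts_list)

-- ===== LEMMAS AND PROOFS =====

-- A's first pass over fresh, pairwise-distinct samples appends the items and unions the keys
theorem pvA_pass (items : List (String × List (String × Int)))
    (afs : PySem.Set String) (merged : PySem.Dict String (List (String × Int)))
    (hnd : (items.map Prod.fst).Nodup)
    (hfresh : ∀ p ∈ items, merged.contains p.1 = false) :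
    items.foldl pvA_step (some (afs, merged)) =
      some (PySem.Set.update afs (items.flatMap (fun p => p.2.map Prod.fst)),
            PySem.Dict.mk (merged.items ++ items)) := by
  induction items generalizing afs merged with
  | nil => simp
  | cons p rest ih =>
    rw [List.map_cons] at hnd
    obtain ⟨hnp, hrest⟩ := List.nodup_cons.mp hnd
    simp only [List.foldl_cons, pvA_step, hfresh p (by simp), Bool.false_eq_true, if_false]
    rw [ih (PySem.Set.update afs (p.2.map Prod.fst)) (merged.insert p.1 p.2) hrest
      (fun q hq => by
        rw [PySem.Dict.contains_insert]
        have h1 : q.1 ≠ p.1 := fun h =>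
          absurd (h ▸ (List.mem_map_of_mem hq : q.1 ∈ rest.map Prod.fst)) (h ▸ hnp)
        simp [h1, hfresh q (List.mem_cons_of_mem _ hq)])]
    rw [List.flatMap_cons, PySem.Set.update_append]
    congr 2
    apply PySem.Dict.ext
    rw [PySem.Dict.items_insert_of_not_contains _ _ (hfresh p (by simp))]
    simp

-- B's seen-set scan finds no duplicate on a Nodup list of fresh samples
theorem pvB_noDup (items : List (String × List (String × Int))) (seen : PySem.Set String)
    (hnd : (items.map Prod.fst).Nodup)
    (hfresh : ∀ p ∈ items, p.1 ∉ seen) :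
    pvB_hasDup items seen = false := by
  induction items generalizing seen with
  | nil => rfl
  | cons p rest ih =>
    rw [List.map_cons] at hnd
    obtain ⟨hnp, hrest⟩ := List.nodup_cons.mp hnd
    rw [pvB_hasDup, if_neg (by simp [hfresh p (by simp)])]
    refine ih _ hrest (fun q hq => ?_)
    rw [PySem.Set.mem_add]
    push Not
    refine ⟨hfresh q (List.mem_cons_of_mem _ hq), fun h =>
      absurd (h ▸ (List.mem_map_of_mem hq : q.1 ∈ rest.map Prod.fst)) (h ▸ hnp)⟩

-- ===== VERDICT (by name: the statement is the Claim_ definition above) =====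
theorem pvA_value (fl : List (List (String × List (String × Int))))
    (hpre : Pre_merge_feature_counts fl) : merge_feature_counts fl = fl.flatten := by
  obtain ⟨h1, h2, h3⟩ := hpre
  unfold merge_feature_counts
  rw [← List.foldl_flatten, pvA_pass _ _ _ h1 (by simp)]
  dsimp only
  rw [if_pos]
  · show [] ++ fl.flatten = fl.flatten
    simp
  · rw [List.all_eq_true]
    intro p hp
    replace hp : p ∈ fl.flatten := by simpa [PySem.Dict.empty] using hp
    rw [PySem.Set.empty_eq, PySem.Set.update_nil_left, PySem.Set.equal_iff]
    intro x
    simp only [PySem.Set.mem_ofList]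
    exact ⟨fun hx => List.mem_flatMap.mpr ⟨p, hp, hx⟩, fun hx => h3 p hp x hx⟩

theorem pvB_value (fl : List (List (String × List (String × Int))))
    (hpre : Pre_merge_feature_counts fl) : merge_feature_counts_alt fl = fl.flatten := by
  obtain ⟨h1, h2, h3⟩ := hpre
  unfold merge_feature_counts_alt
  have hitems : fl.flatMap (fun fc => fc) = fl.flatten := by simp
  rw [hitems]
  dsimp only
  have hnodup : pvB_hasDup fl.flatten PySem.Set.empty = false :=
    pvB_noDup fl.flatten PySem.Set.empty h1 (fun p _ h => by simp [PySem.Set.empty] at h)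
  rw [hnodup]
  simp only [Bool.false_eq_true, if_false]
  match hm : fl.flatten with
  | [] => rfl
  | first :: rest =>
    have hfirst : first ∈ fl.flatten := by rw [hm]; simp
    dsimp only
    rw [if_pos]
    · rw [← hm]
      rw [PySem.Dict.items_foldl_insert_fresh fl.flatten Prod.fst Prod.snd PySem.Dict.empty
        (by simp) h1]
      simp [PySem.Dict.empty]
    · rw [List.all_eq_true]
      intro q hq
      replace hq : q ∈ fl.flatten := by rw [hm]; exact hq
      rw [PySem.Set.equal_iff]
      intro x
      simp only [PySem.Set.mem_ofList]
      constructor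
      · exact fun hx => h3 first hfirst x (List.mem_flatMap.mpr ⟨q, hq, hx⟩)
      · exact fun hx => h3 q hq x (List.mem_flatMap.mpr ⟨first, hfirst, hx⟩)

theorem merge_feature_counts_spec : Claim_equal_merge_feature_counts := by
  intro fl _ hpre
  unfold Spec_merge_feature_counts
  rw [pvA_value fl hpre, pvB_value fl hpre]
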